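-- pv_equiv track=rewrite | github.com/Crowfunder/AISD-studia | Lab07/main.py | PatternSearchNaive
-- ===== SOURCE A (Python) =====
-- def PatternSearchNaive(data, pattern, matrix_size):
-- 	"""
-- 	Search for a pattern in a 2D matrix using the naive approach.
--
-- 	Parameters:
-- 		data (list[str]): The matrix data as a list of strings.
-- 		pattern (str): The pattern to search for.
-- 		matrix_size (int): The size of the matrix.
--
-- 	Returns:
-- 		list[tuple[int]]: A list of tuples representing the positions of the found patterns.
--
-- 	"""
-- 	patterns_found: list[tuple] = []
-- 	ptrn_len = len(pattern)   # let's avoid multiple len() calls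
-- 	for y in range(0, matrix_size):
-- 		for x in range(0, matrix_size):
--
-- 			# This looks awful, but is very simple.
-- 			# The first condition checks if this and next letters in row are the pattern.
-- 			# The second condition does the same but it joins letters in column
-- 			# which requires some list shenanigans.
-- 			if (data[y][x : x+ptrn_len] == pattern and
-- 					''.join([line[x] for line in data[y: y+ptrn_len]]) == pattern):
-- 				patterns_found.append((y,x))
--
-- 	return patterns_found
-- ===== SOURCE B (Python) =====
-- def _occurrences(s, p, limit):
--     """All start positions i < limit where p occurs in s at i, in ascending order."""
--     return [i for i in range(limit) if s.startswith(p, i)]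
--
-- def PatternSearchNaive(data, pattern, matrix_size):
--     n = matrix_size
--     # materialise each column string once, instead of re-joining a column per cell
--     cols = [''.join(row[x] for row in data) for x in range(n)]
--     col_hits = [set(_occurrences(c, pattern, n)) for c in cols]
--     out = []
--     for y in range(n):
--         for x in _occurrences(data[y], pattern, n):
--             if y in col_hits[x]:
--                 out.append((y, x))
--     return out
-- ===== Notes on version B (the rewrite author's own statement) =====
-- stated objective: alternative
-- what changed: Instead of re-slicing the row and re-joining the column for every cell, B materialises each column string once, computes per-row and per-column occurrence positions separately, and intersects the two match grids (column hits kept as sets), emitting positions in the same row-major order.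
-- outside the precondition, e.g. on PatternSearchNaive(['ab', 'a'], 'x', 2): A returns [], B raises IndexError
import Mathlib
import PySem

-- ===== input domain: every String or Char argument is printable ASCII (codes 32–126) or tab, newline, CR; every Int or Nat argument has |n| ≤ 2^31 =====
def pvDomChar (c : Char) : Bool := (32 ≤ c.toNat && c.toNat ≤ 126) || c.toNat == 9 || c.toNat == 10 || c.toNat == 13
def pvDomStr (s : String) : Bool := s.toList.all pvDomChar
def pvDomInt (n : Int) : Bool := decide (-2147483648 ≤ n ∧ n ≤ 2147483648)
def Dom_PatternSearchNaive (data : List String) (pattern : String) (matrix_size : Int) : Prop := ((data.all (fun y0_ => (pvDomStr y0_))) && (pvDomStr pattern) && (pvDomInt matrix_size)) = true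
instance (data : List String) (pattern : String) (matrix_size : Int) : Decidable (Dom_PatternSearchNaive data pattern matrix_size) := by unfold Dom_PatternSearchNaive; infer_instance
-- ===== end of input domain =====

-- B replaces A's per-cell row slice + per-cell column join with column strings built once,
-- per-row/per-column occurrence lists and an intersection of the two match grids (objective: alternative).

-- ===== PORT A =====
-- line[x] / row[x]: Python raises IndexError out of range; Pre_ keeps the index in range, so the default is never used
def pvCharAt (line : String) (x : Int) : Char := (PySem.Str.pyGet? line x).getD ' '

def PatternSearchNaive (data : List String) (pattern : String) (matrix_size : Int) : List (List Int) :=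
  let ptrn_len : Int := PySem.Str.len pattern
  (PySem.List.pyRange 0 matrix_size 1).foldl (fun acc y =>
    (PySem.List.pyRange 0 matrix_size 1).foldl (fun acc x =>
      if (PySem.List.slice (PySem.List.pyGetD data y "").toList (some x) (some (x + ptrn_len)) == pattern.toList)
          && ((PySem.List.slice data (some y) (some (y + ptrn_len))).map (fun line => pvCharAt line x) == pattern.toList)
      then acc ++ [[y, x]] else acc) acc) []

-- ===== PORT B =====
-- s.startswith(p, i): exact for 0 ≤ i ≤ len s (there Python compares s[i:i+len p] with p); Pre_ keeps i in that range
def pvStartsWithAt (s p : List Char) (i : Int) : Bool :=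
  PySem.List.slice s (some i) (some (i + (p.length : Int))) == p

def pvOccurrences (s p : List Char) (limit : Int) : List Int :=
  (PySem.List.pyRange 0 limit 1).filter (fun i => pvStartsWithAt s p i)

def PatternSearchNaive_alt (data : List String) (pattern : String) (matrix_size : Int) : List (List Int) :=
  let n := matrix_size
  let cols : List (List Char) := (PySem.List.pyRange 0 n 1).map (fun x => data.map (fun row => pvCharAt row x))
  let colHits : List (PySem.Set Int) := cols.map (fun c => PySem.Set.ofList (pvOccurrences c pattern.toList n))
  (PySem.List.pyRange 0 n 1).foldl (fun acc y =>
    (pvOccurrences (PySem.List.pyGetD data y "").toList pattern.toList n).foldl (fun acc x =>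
      if PySem.Set.contains (PySem.List.pyGetD colHits x PySem.Set.empty) y then acc ++ [[y, x]] else acc) acc) []

-- ===== PRECONDITION & SPEC =====
-- Pre_ excludes matrices with fewer than matrix_size rows or with a row shorter than matrix_size,
-- on which A raises IndexError for some patterns and returns a value only when no row match reaches the ragged part.
def Pre_PatternSearchNaive (data : List String) (pattern : String) (matrix_size : Int) : Prop :=
  matrix_size ≤ (data.length : Int) ∧ ∀ row ∈ data, matrix_size ≤ (row.toList.length : Int)
instance (data : List String) (pattern : String) (matrix_size : Int) : Decidable (Pre_PatternSearchNaive data pattern matrix_size) := by unfold Pre_PatternSearchNaive; infer_instance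

def pvWitness_PatternSearchNaive : List String × String × Int := (["ab", "ba"], "a", 2)

def Spec_PatternSearchNaive (data : List String) (pattern : String) (matrix_size : Int) (out : List (List Int)) : Prop := out = PatternSearchNaive_alt data pattern matrix_size
instance (data : List String) (pattern : String) (matrix_size : Int) (out : List (List Int)) : Decidable (Spec_PatternSearchNaive data pattern matrix_size out) := by unfold Spec_PatternSearchNaive; infer_instance

-- ===== CLAIM (what is proved, stated in full; the proofs are below) =====
def Claim_equal_PatternSearchNaive : Prop := ∀ (data : List String) (pattern : String) (matrix_size : Int), Dom_PatternSearchNaive data pattern matrix_size → Pre_PatternSearchNaive data pattern matrix_size → Spec_PatternSearchNaive data pattern matrix_size (PatternSearchNaive data pattern matrix_size)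

-- ===== LEMMAS AND PROOFS =====

theorem pvWitness_ok : Dom_PatternSearchNaive pvWitness_PatternSearchNaive.1 pvWitness_PatternSearchNaive.2.1 pvWitness_PatternSearchNaive.2.2 ∧ Pre_PatternSearchNaive pvWitness_PatternSearchNaive.1 pvWitness_PatternSearchNaive.2.1 pvWitness_PatternSearchNaive.2.2 := by
  constructor <;> decide

-- map commutes with a nonnegative slice
theorem pv_slice_map {α β : Type} (f : α → β) (l : List α) (a b : Int) (ha : 0 ≤ a) (hb : 0 ≤ b) :
    PySem.List.slice (l.map f) (some a) (some b) = (PySem.List.slice l (some a) (some b)).map f := by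
  rw [PySem.List.slice_toNat (l.map f) ha hb, PySem.List.slice_toNat l ha hb]
  simp [List.map_take, List.map_drop]

-- a nested append-if fold is a flatMap of filtered maps
theorem pv_double (l1 : List Int) (l2 : Int → List Int) (p : Int → Int → Bool) (f : Int → Int → List Int) :
    l1.foldl (fun acc y => (l2 y).foldl (fun acc x => if p y x then acc ++ [f y x] else acc) acc) []
      = l1.flatMap (fun y => ((l2 y).filter (p y)).map (f y)) := by
  rw [PySem.List.foldl_congr_mem l1 _
        (fun acc y => acc ++ ((l2 y).filter (p y)).map (f y)) []
        (fun acc y _ => PySem.List.foldl_append_if (p y) (f y) (l2 y) acc),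
      PySem.List.foldl_append_eq_flatMap]
  simp

theorem pv_flatMap_congr {α : Type} (l : List Int) (f g : Int → List α)
    (h : ∀ y ∈ l, f y = g y) : l.flatMap f = l.flatMap g := by
  induction l with
  | nil => rfl
  | cons a t ih =>
      simp only [List.flatMap_cons, h a (by simp)]
      rw [ih (fun y hy => h y (by simp [hy]))]

-- ===== VERDICT (by name: the statement is the Claim_ definition above) =====
theorem PatternSearchNaive_spec : Claim_equal_PatternSearchNaive := by
  intro data pattern n _hdom hpre
  obtain ⟨hlen, hrows⟩ := hpre
  unfold Spec_PatternSearchNaive PatternSearchNaive PatternSearchNaive_alt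
  dsimp only
  rw [pv_double (PySem.List.pyRange 0 n 1) (fun _ => PySem.List.pyRange 0 n 1)
        (fun y x =>
          (PySem.List.slice (PySem.List.pyGetD data y "").toList (some x) (some (x + PySem.Str.len pattern)) == pattern.toList)
            && ((PySem.List.slice data (some y) (some (y + PySem.Str.len pattern))).map (fun line => pvCharAt line x) == pattern.toList))
        (fun y x => [y, x]),
      pv_double (PySem.List.pyRange 0 n 1)
        (fun y => pvOccurrences (PySem.List.pyGetD data y "").toList pattern.toList n)
        (fun _y x => PySem.Set.contains
          (PySem.List.pyGetD
            (((PySem.List.pyRange 0 n 1).map (fun x => data.map (fun row => pvCharAt row x))).map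
              (fun c => PySem.Set.ofList (pvOccurrences c pattern.toList n))) x PySem.Set.empty) _y)
        (fun y x => [y, x])]
  apply pv_flatMap_congr
  intro y hy
  obtain ⟨hy0, hyn⟩ := PySem.List.mem_pyRange_one.mp hy
  unfold pvOccurrences
  rw [List.filter_filter]
  apply congrArg
  apply List.filter_congr
  intro x hx
  obtain ⟨hx0, hxn⟩ := PySem.List.mem_pyRange_one.mp hx
  rw [List.map_map, PySem.List.pyGetD_map_pyRange_of_nonneg _ n x _ hx0 hxn]
  rw [Bool.eq_iff_iff]
  simp only [Bool.and_eq_true, beq_iff_eq, Function.comp_apply, PySem.Set.contains_iff,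
    PySem.Set.mem_ofList, pvStartsWithAt, PySem.Str.len_eq]
  constructor
  · rintro ⟨h1, h2⟩
    refine ⟨?_, h1⟩
    rw [List.mem_filter]
    refine ⟨PySem.List.mem_pyRange_one.mpr ⟨hy0, hyn⟩, ?_⟩
    simp only [beq_iff_eq]
    rw [pv_slice_map (fun row => pvCharAt row x) data y (y + (pattern.toList.length : Int)) hy0 (by positivity)]
    exact h2
  · rintro ⟨h2, h1⟩
    refine ⟨h1, ?_⟩
    rw [List.mem_filter] at h2
    have := h2.2
    simp only [beq_iff_eq] at this
    rw [pv_slice_map (fun row => pvCharAt row x) data y (y + (pattern.toList.length : Int)) hy0 (by positivity)] at this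
    exact this
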